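-- pv_equiv track=rewrite | github.com/Mathstarry/Leetcode | others/0001_XorSum/solution1.py | XorSum
-- ===== SOURCE A (Python) =====
-- def XorSum(nums):
--     # 基础版
--     stackMin, stackMax = [-1], [-1]
--     res, n = 0, len(nums)
--     for i in range(n):
--         while stackMin[-1] >= 0 and nums[stackMin[-1]] > nums[i]:
--             p = stackMin.pop()
--             if ((i - p) * (p - stackMin[-1])) % 2 == 1:
--                 res ^= nums[p]
--         stackMin.append(i)
--         while stackMax[-1] >= 0 and nums[stackMax[-1]] < nums[i]:
--             q = stackMax.pop()
--             if ((i - q) * (q - stackMax[-1])) % 2 == 1: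
--                 res ^= nums[q]
--         stackMax.append(i)
--     while stackMin[-1] >= 0:
--         p = stackMin.pop()
--         if ((n - p) * (p - stackMin[-1])) % 2 == 1:
--             res ^= nums[p]
--     while stackMax[-1] >= 0:
--         q = stackMax.pop()
--         if ((n - q) * (q - stackMax[-1])) % 2 == 1:
--             res ^= nums[q]
--
--     return res
-- ===== SOURCE B (Python) =====
-- def XorSum(nums):
--     # Per-element boundary scans: for each index p, find its min-span and max-span
--     # directly and XOR nums[p] in when the subarray count is odd. No stacks.
--     n = len(nums)
--     res = 0
--     for p in range(n):
--         # subarrays whose minimum is first attained at p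
--         l = p
--         while l > 0 and nums[l - 1] > nums[p]:
--             l -= 1
--         r = p + 1
--         while r < n and nums[r] >= nums[p]:
--             r += 1
--         if ((p - l + 1) * (r - p)) % 2 == 1:
--             res ^= nums[p]
--         # subarrays whose maximum is first attained at p
--         l = p
--         while l > 0 and nums[l - 1] < nums[p]:
--             l -= 1
--         r = p + 1
--         while r < n and nums[r] <= nums[p]:
--             r += 1
--         if ((p - l + 1) * (r - p)) % 2 == 1:
--             res ^= nums[p]
--     return res
-- ===== Notes on version B (the rewrite author's own statement) =====
-- stated objective: simpler
-- what changed: Replaced the two monotonic index stacks (amortised O(n) pops with stack-top boundary bookkeeping) by direct per-element boundary scans: for each index p, two short while-loops find the span in which nums[p] is the (first-occurrence) minimum resp. maximum, and nums[p] is XORed in when the subarray count is odd.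
import Mathlib
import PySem

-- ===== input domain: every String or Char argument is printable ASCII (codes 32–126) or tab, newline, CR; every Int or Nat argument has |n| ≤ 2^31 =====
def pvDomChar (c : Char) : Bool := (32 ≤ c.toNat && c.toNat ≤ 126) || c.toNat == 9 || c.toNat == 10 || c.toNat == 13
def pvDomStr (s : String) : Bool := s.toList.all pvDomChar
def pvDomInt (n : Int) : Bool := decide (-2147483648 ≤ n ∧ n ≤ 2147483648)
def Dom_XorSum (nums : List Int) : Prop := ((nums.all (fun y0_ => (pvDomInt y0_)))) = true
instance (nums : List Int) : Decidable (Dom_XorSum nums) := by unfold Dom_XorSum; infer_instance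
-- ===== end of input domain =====

-- B replaces A's two monotonic stacks by direct per-element boundary scans (same value; plainer, not faster).

-- ===== PORT A =====
-- one of A's four structurally identical `while` pop-loops (stack kept top-first: Python's
-- `stack[-1]` is the head, `append` is cons, `pop` drops the head; `bnd` is `i` resp. `n`,
-- `keep` is the loop condition's second conjunct — constantly true for the two flush loops)
def pvPop (nums : List Int) (bnd : Int) (keep : Int → Bool) :
    List Int → Int → List Int × Int
  | [], res => ([], res)
  | t :: rest, res =>
    if 0 ≤ t ∧ keep t = true then
      pvPop nums bnd keep rest
        (if PySem.Int.mod ((bnd - t) * (t - rest.headD 0)) 2 == 1 then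
           PySem.Int.bxor res (PySem.List.pyGetD nums t 0)
         else res)
    else (t :: rest, res)

-- A's `for` body: pop-then-push on the min stack, then on the max stack
def pvStepA (nums : List Int) (st : List Int × List Int × Int) (i : Int) :
    List Int × List Int × Int :=
  let r1 := pvPop nums i (fun t => decide (PySem.List.pyGetD nums t 0 > PySem.List.pyGetD nums i 0)) st.1 st.2.2
  let r2 := pvPop nums i (fun t => decide (PySem.List.pyGetD nums t 0 < PySem.List.pyGetD nums i 0)) st.2.1 r1.2
  (i :: r1.1, i :: r2.1, r2.2)

def XorSum (nums : List Int) : Int :=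
  let n := PySem.List.len nums
  let st := (PySem.List.pyRange 0 n 1).foldl (pvStepA nums) ([-1], [-1], 0)
  let f1 := pvPop nums n (fun _ => true) st.1 st.2.2
  (pvPop nums n (fun _ => true) st.2.1 f1.2).2

-- ===== PORT B =====
-- B's backward scan: `while l > 0 and tst(nums[l-1]): l -= 1`
def pvScanL (nums : List Int) (tst : Int → Bool) (l : Int) : Int :=
  if h : 0 < l ∧ tst (PySem.List.pyGetD nums (l - 1) 0) then pvScanL nums tst (l - 1) else l
termination_by l.toNat
decreasing_by omega

-- B's forward scan: `while r < n and tst(nums[r]): r += 1`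
def pvScanR (nums : List Int) (tst : Int → Bool) (r : Int) : Int :=
  if h : r < PySem.List.len nums ∧ tst (PySem.List.pyGetD nums r 0) then pvScanR nums tst (r + 1) else r
termination_by (PySem.List.len nums - r).toNat
decreasing_by simp [PySem.List.len] at *; omega

-- B's `for` body: boundary scans for the min role, then for the max role
def pvStepB (nums : List Int) (res : Int) (p : Int) : Int :=
  let vp := PySem.List.pyGetD nums p 0
  let l1 := pvScanL nums (fun x => decide (x > vp)) p
  let r1 := pvScanR nums (fun x => decide (x ≥ vp)) (p + 1)
  let res := if PySem.Int.mod ((p - l1 + 1) * (r1 - p)) 2 == 1 then PySem.Int.bxor res vp else res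
  let l2 := pvScanL nums (fun x => decide (x < vp)) p
  let r2 := pvScanR nums (fun x => decide (x ≤ vp)) (p + 1)
  if PySem.Int.mod ((p - l2 + 1) * (r2 - p)) 2 == 1 then PySem.Int.bxor res vp else res

def XorSum_alt (nums : List Int) : Int :=
  (PySem.List.pyRange 0 (PySem.List.len nums) 1).foldl (pvStepB nums) 0

-- ===== PRECONDITION & SPEC =====
def Spec_XorSum (nums : List Int) (out : Int) : Prop := out = XorSum_alt nums
instance (nums : List Int) (out : Int) : Decidable (Spec_XorSum nums out) := by unfold Spec_XorSum; infer_instance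

-- ===== CLAIM (what is proved, stated in full; the proofs are below) =====
def Claim_equal_XorSum : Prop := ∀ (nums : List Int), Dom_XorSum nums → Spec_XorSum nums (XorSum nums)

-- ===== LEMMAS AND PROOFS =====

-- pop tests of the two stacks
def pvGT : Int → Int → Bool := fun a b => decide (a > b)
def pvLT : Int → Int → Bool := fun a b => decide (a < b)

-- value at a Nat index (0 when out of range; in range wherever it is used)
def pvV (nums : List Int) (k : Nat) : Int := nums.getD k 0

-- `pvSurv nums c j i`: index j has not been popped (pop test c) after processing 0..i-1
def pvSurv (nums : List Int) (c : Int → Int → Bool) (j i : Nat) : Bool :=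
  decide (∀ m, m < i → j < m → c (pvV nums j) (pvV nums m) = false)

-- stack contents (top first, sentinel omitted) after processing 0..i-1
def pvStk (nums : List Int) (c : Int → Int → Bool) (i : Nat) : List Nat :=
  ((List.range i).filter (fun j => pvSurv nums c j i)).reverse

def pvNxt (nums : List Int) (c : Int → Int → Bool) (j : Nat) : Int :=
  pvScanR nums (fun x => !(c (pvV nums j) x)) ((j : Int) + 1)

def pvLft (nums : List Int) (c : Int → Int → Bool) (j : Nat) : Int :=
  pvScanL nums (fun x => c x (pvV nums j)) (j : Int)

def pvContrib (nums : List Int) (c : Int → Int → Bool) (j : Nat) : Int :=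
  if PySem.Int.mod (((j : Int) - pvLft nums c j + 1) * (pvNxt nums c j - (j : Int))) 2 == 1 then
    pvV nums j
  else 0

def pvXorList (l : List Int) : Int := l.foldr PySem.Int.bxor 0

def pvBelow : List Nat → Int
  | [] => -1
  | b :: _ => (b : Int)

def pvRes (nums : List Int) (c₁ c₂ : Int → Int → Bool) (i : Nat) : Int :=
  pvXorList ((List.range i).map (fun j =>
    PySem.Int.bxor (if pvSurv nums c₁ j i then 0 else pvContrib nums c₁ j)
                   (if pvSurv nums c₂ j i then 0 else pvContrib nums c₂ j)))

-- ---- xor algebra ----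
theorem pv_bxor_eq_xor (a b : Int) : PySem.Int.bxor a b = Int.xor a b := by
  unfold PySem.Int.bxor
  cases a with
  | ofNat m => cases b with
    | ofNat n => simp [Int.xor]
    | negSucc n => simp [Int.xor, Int.negSucc_eq]; omega
  | negSucc m => cases b with
    | ofNat n => simp [Int.xor, Int.negSucc_eq]; omega
    | negSucc n => simp [Int.xor, Int.negSucc_eq]; omega

theorem pv_bxor_assoc (a b c : Int) :
    PySem.Int.bxor (PySem.Int.bxor a b) c = PySem.Int.bxor a (PySem.Int.bxor b c) := by
  simp only [pv_bxor_eq_xor]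
  cases a <;> cases b <;> cases c <;> simp [Int.xor, Nat.xor_assoc]

theorem pv_bxor_left_comm (a b c : Int) :
    PySem.Int.bxor a (PySem.Int.bxor b c) = PySem.Int.bxor b (PySem.Int.bxor a c) := by
  rw [← pv_bxor_assoc, PySem.Int.bxor_comm a b, pv_bxor_assoc]

theorem pv_bxor_zero_left (a : Int) : PySem.Int.bxor 0 a = a := by
  rw [PySem.Int.bxor_comm]; exact PySem.Int.bxor_zero a

-- ---- pvXorList shapes ----
theorem pvXorList_cons (x : Int) (l : List Int) :
    pvXorList (x :: l) = PySem.Int.bxor x (pvXorList l) := rfl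

theorem pvXorList_snoc (l : List Int) (x : Int) :
    pvXorList (l ++ [x]) = PySem.Int.bxor (pvXorList l) x := by
  induction l with
  | nil => simp [pvXorList, PySem.Int.bxor_zero, pv_bxor_zero_left]
  | cons a t ih => simp only [List.cons_append, pvXorList_cons, ih, pv_bxor_assoc]

theorem pvXorList_map_bxor (g h : Nat → Int) (l : List Nat) :
    pvXorList (l.map (fun j => PySem.Int.bxor (g j) (h j)))
      = PySem.Int.bxor (pvXorList (l.map g)) (pvXorList (l.map h)) := by
  induction l with
  | nil => simp [pvXorList, PySem.Int.bxor_zero]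
  | cons a t ih =>
    simp only [List.map_cons, pvXorList_cons, ih]
    rw [pv_bxor_assoc, pv_bxor_assoc]
    congr 1
    rw [pv_bxor_left_comm]

theorem pvXorList_reverse (l : List Int) : pvXorList l.reverse = pvXorList l := by
  induction l with
  | nil => rfl
  | cons a t ih =>
    simp only [List.reverse_cons, pvXorList_snoc, pvXorList_cons, ih]
    rw [PySem.Int.bxor_comm]

theorem pvXorList_ite_filter (p : Nat → Bool) (g : Nat → Int) (l : List Nat) :
    pvXorList (l.map (fun j => if p j then g j else 0))
      = pvXorList ((l.filter p).map g) := by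
  induction l with
  | nil => rfl
  | cons a t ih =>
    by_cases h : p a = true
    · simp [h, pvXorList_cons, ih]
    · simp only [Bool.not_eq_true] at h
      simp [h, pvXorList_cons, ih, pv_bxor_zero_left]

-- ---- scan characterizations ----
theorem pvScanL_unique (nums : List Int) (tst : Int → Bool) (l r : Int)
    (h0 : 0 ≤ r) (h1 : r ≤ l)
    (h2 : ∀ j : Int, r ≤ j → j < l → tst (PySem.List.pyGetD nums j 0) = true)
    (h3 : r = 0 ∨ tst (PySem.List.pyGetD nums (r - 1) 0) = false) :
    pvScanL nums tst l = r := by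
  rw [pvScanL]
  split
  · next h =>
    have hrl : r < l := by
      rcases lt_or_eq_of_le h1 with h' | h'
      · exact h'
      · exfalso
        rcases h3 with h3 | h3
        · omega
        · rw [h'] at h3; rw [h3] at h; simp at h
    exact pvScanL_unique nums tst (l - 1) r h0 (by omega)
      (fun j hj1 hj2 => h2 j hj1 (by omega)) h3
  · next h =>
    rcases lt_or_eq_of_le h1 with h' | h'
    · exfalso
      exact h ⟨by omega, h2 (l - 1) (by omega) (by omega)⟩
    · omega
termination_by l.toNat

theorem pvScanR_unique (nums : List Int) (tst : Int → Bool) (r0 r : Int)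
    (h1 : r0 ≤ r) (hrn : r ≤ PySem.List.len nums)
    (h2 : ∀ j : Int, r0 ≤ j → j < r → tst (PySem.List.pyGetD nums j 0) = true)
    (h3 : r = PySem.List.len nums ∨ tst (PySem.List.pyGetD nums r 0) = false) :
    pvScanR nums tst r0 = r := by
  rw [pvScanR]
  split
  · next h =>
    have hrl : r0 < r := by
      rcases lt_or_eq_of_le h1 with h' | h'
      · exact h'
      · exfalso
        rcases h3 with h3 | h3
        · omega
        · rw [← h'] at h3; rw [h3] at h; simp at h
    exact pvScanR_unique nums tst (r0 + 1) r (by omega) hrn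
      (fun j hj1 hj2 => h2 j (by omega) hj2) h3
  · next h =>
    rcases lt_or_eq_of_le h1 with h' | h'
    · exfalso
      exact h ⟨by omega, h2 r0 (by omega) h'⟩
    · omega
termination_by (PySem.List.len nums - r0).toNat
decreasing_by simp [PySem.List.len] at *; omega

theorem pvScanR_congr (nums : List Int) (tst tst' : Int → Bool)
    (hp : ∀ x, tst x = tst' x) (r : Int) :
    pvScanR nums tst r = pvScanR nums tst' r := by
  rw [pvScanR]
  conv_rhs => rw [pvScanR]
  simp only [hp]
  split
  · exact pvScanR_congr nums tst tst' hp (r + 1)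
  · rfl
termination_by (PySem.List.len nums - r).toNat
decreasing_by simp [PySem.List.len] at *; omega

-- ---- index bridging ----
theorem pvV_natCast (nums : List Int) (k : Nat) :
    PySem.List.pyGetD nums (k : Int) 0 = pvV nums k := by
  rw [PySem.List.pyGetD_natCast]; rfl

theorem pvV_eq (nums : List Int) (i : Int) (h : 0 ≤ i) :
    PySem.List.pyGetD nums i 0 = pvV nums i.toNat := by
  conv_lhs => rw [← Int.toNat_of_nonneg h]
  rw [pvV_natCast]

-- ---- survival / stack structure ----
theorem pvSurv_iff (nums : List Int) (c : Int → Int → Bool) (j i : Nat) :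
    pvSurv nums c j i = true ↔ ∀ m, m < i → j < m → c (pvV nums j) (pvV nums m) = false := by
  simp [pvSurv]

theorem pvSurv_mono (nums : List Int) (c : Int → Int → Bool) (j : Nat) {i i' : Nat}
    (h : pvSurv nums c j i' = true) (hle : i ≤ i') : pvSurv nums c j i = true := by
  rw [pvSurv_iff] at *
  exact fun m hm hjm => h m (by omega) hjm

theorem pvSurv_succ (nums : List Int) (c : Int → Int → Bool)
    (Hirr : ∀ a, c a a = false) (j i : Nat) (hj : j ≤ i) :
    pvSurv nums c j (i + 1) = (pvSurv nums c j i && !(c (pvV nums j) (pvV nums i))) := by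
  rcases eq_or_lt_of_le hj with h | h
  · subst h
    have h1 : pvSurv nums c j (j + 1) = true := by rw [pvSurv_iff]; intro m hm hjm; omega
    have h2 : pvSurv nums c j j = true := by rw [pvSurv_iff]; intro m hm hjm; omega
    rw [h1, h2, Hirr]; rfl
  · by_cases hs : pvSurv nums c j i = true
    · by_cases hc : c (pvV nums j) (pvV nums i) = true
      · have hfalse : pvSurv nums c j (i + 1) = false := by
          rw [Bool.eq_false_iff]
          intro hcon
          rw [pvSurv_iff] at hcon
          rw [hcon i (by omega) h] at hc; simp at hc
        rw [hfalse, hs, hc]; rfl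
      · simp only [Bool.not_eq_true] at hc
        have htrue : pvSurv nums c j (i + 1) = true := by
          rw [pvSurv_iff]
          rw [pvSurv_iff] at hs
          intro m hm hjm
          rcases Nat.lt_succ_iff_lt_or_eq.mp hm with h' | h'
          · exact hs m h' hjm
          · subst h'; exact hc
        rw [htrue, hs, hc]; rfl
    · simp only [Bool.not_eq_true] at hs
      have hfalse : pvSurv nums c j (i + 1) = false := by
        rw [Bool.eq_false_iff]
        intro hcon
        rw [← Bool.not_eq_true] at hs
        exact hs (pvSurv_mono nums c j hcon (by omega))
      rw [hfalse, hs]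
      simp

theorem pvStk_succ (nums : List Int) (c : Int → Int → Bool)
    (Hirr : ∀ a, c a a = false) (i : Nat) :
    pvStk nums c (i + 1) = i :: (pvStk nums c i).filter (fun j => !(c (pvV nums j) (pvV nums i))) := by
  unfold pvStk
  rw [List.range_succ, List.filter_append]
  have hi : pvSurv nums c i (i + 1) = true := by rw [pvSurv_iff]; intro m hm hjm; omega
  have hfe : (List.range i).filter (fun j => pvSurv nums c j (i + 1))
      = ((List.range i).filter (fun j => pvSurv nums c j i)).filter
          (fun j => !(c (pvV nums j) (pvV nums i))) := by
    rw [List.filter_filter]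
    apply List.filter_congr
    intro j hj
    rw [List.mem_range] at hj
    rw [pvSurv_succ nums c Hirr j i (Nat.le_of_lt hj)]
    exact Bool.and_comm _ _
  rw [hfe, ← List.filter_reverse]
  simp [hi]

theorem pvStk_mem (nums : List Int) (c : Int → Int → Bool) (i j : Nat) :
    j ∈ pvStk nums c i ↔ j < i ∧ pvSurv nums c j i = true := by
  simp [pvStk, List.mem_reverse, List.mem_filter, List.mem_range]

theorem pvStk_pairwise (nums : List Int) (c : Int → Int → Bool) (i : Nat) :
    (pvStk nums c i).Pairwise (fun a b => b < a) := by
  unfold pvStk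
  rw [List.pairwise_reverse]
  exact (List.pairwise_lt_range).filter _

-- adjacent stack entries have no stack member strictly between them
theorem pv_desc_gap (l : List Nat) (hl : l.Pairwise (fun a b => b < a))
    (u : List Nat) (j : Nat) (rest : List Nat) (h : l = u ++ j :: rest)
    (m : Nat) (hm : m ∈ l) (h1 : pvBelow rest < (m : Int)) (h2 : m < j) : False := by
  subst h
  rw [List.pairwise_append] at hl
  rcases List.mem_append.mp hm with hmu | hmr
  · have := hl.2.2 m hmu j (by simp)
    omega
  · rcases List.mem_cons.mp hmr with h' | h'
    · omega
    · cases rest with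
      | nil => simp at h'
      | cons b w =>
        have hp := hl.2.1
        rw [List.pairwise_cons] at hp
        rcases List.mem_cons.mp h' with h'' | h''
        · subst h''; simp [pvBelow] at h1
        · have hbw := hp.2
          rw [List.pairwise_cons] at hbw
          have := hbw.1 m h''
          simp [pvBelow] at h1
          omega

-- ---- the core fact: between two adjacent stack entries, c points up to the upper one ----
theorem pvBetween (nums : List Int) (c : Int → Int → Bool)
    (Htrans : ∀ a b d, c a b = true → c b d = true → c a d = true)
    (Htot : ∀ a b d, c a d = true → c a b = true ∨ c b d = true)
    (i j : Nat) (hj : pvSurv nums c j i = true) (hji : j < i)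
    (m : Nat) (hmj : m < j) (hns : pvSurv nums c m i = false)
    (hrec : ∀ m', m < m' → m' < j → pvSurv nums c m' i = false) :
    c (pvV nums m) (pvV nums j) = true := by
  have hex : ∃ m', m' < i ∧ m < m' ∧ c (pvV nums m) (pvV nums m') = true := by
    by_contra hcon
    rw [← Bool.not_eq_true] at hns
    apply hns
    rw [pvSurv_iff]
    intro m' hm' hmm'
    rcases Bool.eq_false_or_eq_true (c (pvV nums m) (pvV nums m')) with h | h
    · exact absurd ⟨m', hm', hmm', h⟩ hcon
    · exact h
  obtain ⟨m', hm'i, hmm', hc⟩ := hex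
  rcases lt_trichotomy m' j with h' | h' | h'
  · have hcj : c (pvV nums m') (pvV nums j) = true :=
      pvBetween nums c Htrans Htot i j hj hji m' h' (hrec m' hmm' h')
        (fun x hx1 hx2 => hrec x (by omega) hx2)
    exact Htrans _ _ _ hc hcj
  · subst h'; exact hc
  · rcases Htot (pvV nums m) (pvV nums j) (pvV nums m') hc with h'' | h''
    · exact h''
    · exfalso
      rw [pvSurv_iff] at hj
      rw [hj m' hm'i h'] at h''
      simp at h''
termination_by j - m

-- ---- boundary identification ----
theorem pvNxt_eq (nums : List Int) (c : Int → Int → Bool) (i j : Nat)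
    (hj : pvSurv nums c j i = true) (hji : j < i) (hin : i ≤ nums.length)
    (hpop : i = nums.length ∨ c (pvV nums j) (pvV nums i) = true) :
    pvNxt nums c j = (i : Int) := by
  apply pvScanR_unique nums _ _ (i : Int) (by omega) (by simp [PySem.List.len_eq]; omega)
  · intro x hx1 hx2
    rw [pvV_eq nums x (by omega)]
    rw [pvSurv_iff] at hj
    rw [hj x.toNat (by omega) (by omega)]
    rfl
  · rcases hpop with h | h
    · left; simp [PySem.List.len_eq]; omega
    · right
      rw [pvV_natCast, h]
      rfl

theorem pvLft_eq (nums : List Int) (c : Int → Int → Bool)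
    (Htrans : ∀ a b d, c a b = true → c b d = true → c a d = true)
    (Htot : ∀ a b d, c a d = true → c a b = true ∨ c b d = true)
    (i j : Nat) (hj : pvSurv nums c j i = true) (hji : j < i)
    (below : Int) (hb0 : -1 ≤ below) (hbj : below < (j : Int))
    (hbs : below = -1 ∨ (0 ≤ below ∧ pvSurv nums c below.toNat i = true))
    (hgap : ∀ m : Nat, below < (m : Int) → m < j → pvSurv nums c m i = false) :
    pvLft nums c j = below + 1 := by
  apply pvScanL_unique nums _ _ (below + 1) (by omega) (by omega)
  · intro x hx1 hx2
    rw [pvV_eq nums x (by omega)]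
    exact pvBetween nums c Htrans Htot i j hj hji x.toNat (by omega)
      (hgap x.toNat (by omega) (by omega))
      (fun m' h1 h2 => hgap m' (by omega) h2)
  · rcases hbs with h | ⟨hh1, hh2⟩
    · left; omega
    · right
      have hsimp : below + 1 - 1 = below := by omega
      rw [hsimp, pvV_eq nums below hh1]
      rw [pvSurv_iff] at hh2
      exact hh2 j hji (by omega)

-- ---- the generic pop-loop lemma ----
theorem pvPopSpec (nums : List Int) (bnd : Int) (q : Int → Bool) (contribF : Nat → Int)
    (P K : List Nat) (res : Int)
    (hP : ∀ j ∈ P, q (j : Int) = true)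
    (hK : ∀ b w, K = b :: w → q (b : Int) = false)
    (hadj : ∀ (r : Int) (u : List Nat) (j : Nat) (rest : List Nat), P = u ++ j :: rest →
        (if PySem.Int.mod ((bnd - (j : Int)) * ((j : Int) - pvBelow (rest ++ K))) 2 == 1 then
           PySem.Int.bxor r (PySem.List.pyGetD nums (j : Int) 0)
         else r) = PySem.Int.bxor r (contribF j)) :
    pvPop nums bnd q ((P ++ K).map (fun j : Nat => (j : Int)) ++ [-1]) res
      = (K.map (fun j : Nat => (j : Int)) ++ [-1], PySem.Int.bxor res (pvXorList (P.map contribF))) := by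
  induction P generalizing res with
  | nil =>
    cases K with
    | nil => simp [pvPop, pvXorList, PySem.Int.bxor_zero]
    | cons b w =>
      simp only [List.nil_append, List.map_cons, List.cons_append]
      rw [pvPop]
      rw [if_neg (by rw [hK b w rfl]; simp)]
      simp [pvXorList, PySem.Int.bxor_zero]
  | cons j P' ih =>
    simp only [List.cons_append, List.map_cons]
    rw [pvPop]
    rw [if_pos ⟨Int.natCast_nonneg j, hP j (by simp)⟩]
    have hhead : ((P' ++ K).map (fun j : Nat => (j : Int)) ++ [-1]).headD 0 = pvBelow (P' ++ K) := by
      cases h : P' ++ K with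
      | nil => simp [h, pvBelow]
      | cons b w => simp [h, pvBelow]
    rw [hhead]
    rw [hadj res [] j P' rfl]
    rw [ih _ (fun x hx => hP x (List.mem_cons_of_mem j hx))
      (fun r u j' rest h => hadj r (j :: u) j' rest (by rw [List.cons_append, h]))]
    simp only [List.map_cons, pvXorList_cons]
    rw [pv_bxor_assoc]

-- a predicate closed towards the top of the stack splits it into filter/filter-not
theorem pv_filter_split (p : Nat → Bool) (l : List Nat)
    (hcl : l.Pairwise (fun a b => p b = true → p a = true)) :
    l = l.filter p ++ l.filter (fun x => !(p x)) := by
  induction l with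
  | nil => rfl
  | cons a t ih =>
    rw [List.pairwise_cons] at hcl
    by_cases h : p a = true
    · simp only [List.filter_cons, h, if_pos]
      simpa using ih hcl.2
    · simp only [Bool.not_eq_true] at h
      have hall : ∀ x ∈ t, p x = false := by
        intro x hx
        rcases Bool.eq_false_or_eq_true (p x) with h' | h'
        · rw [hcl.1 x hx h'] at h; simp at h
        · exact h' 
      simp only [List.filter_cons, h]
      simp only [Bool.false_eq_true, if_false, Bool.not_false, if_pos]
      rw [List.filter_eq_nil_iff.mpr (by intro x hx; simp [hall x hx]),
          List.filter_eq_self.mpr (by intro x hx; simp [hall x hx])]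
      rfl

-- one pop-loop of A, on the abstract stack: pops exactly the q-part, adds its contributions
theorem pvPopStep (nums : List Int) (c : Int → Int → Bool)
    (Htrans : ∀ a b d, c a b = true → c b d = true → c a d = true)
    (Htot : ∀ a b d, c a d = true → c a b = true ∨ c b d = true)
    (i : Nat) (hin : i ≤ nums.length) (q : Int → Bool)
    (hq : ∀ j : Nat, j ∈ pvStk nums c i →
      (q (j : Int) = true ↔ (i = nums.length ∨ c (pvV nums j) (pvV nums i) = true)))
    (res : Int) :
    pvPop nums (i : Int) q ((pvStk nums c i).map (fun j : Nat => (j : Int)) ++ [-1]) res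
      = (((pvStk nums c i).filter (fun j : Nat => !(q (j : Int)))).map (fun j : Nat => (j : Int)) ++ [-1],
         PySem.Int.bxor res
           (pvXorList (((pvStk nums c i).filter (fun j : Nat => q (j : Int))).map (pvContrib nums c)))) := by
  have hpair := pvStk_pairwise nums c i
  have hclosed : (pvStk nums c i).Pairwise (fun (a b : Nat) => q (b : Int) = true → q (a : Int) = true) := by
    refine List.Pairwise.imp_of_mem ?_ hpair
    intro a b ha hb hba hqb
    rcases (hq b hb).mp hqb with h | h
    · exact (hq a ha).mpr (Or.inl h)
    · rcases Htot (pvV nums b) (pvV nums a) (pvV nums i) h with h' | h'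
      · exfalso
        have hsb := ((pvStk_mem nums c i b).mp hb).2
        have hai := ((pvStk_mem nums c i a).mp ha).1
        rw [pvSurv_iff] at hsb
        rw [hsb a hai hba] at h'; simp at h'
      · exact (hq a ha).mpr (Or.inr h')
  have hsplit := pv_filter_split (fun j : Nat => q (j : Int)) (pvStk nums c i) hclosed
  have happ := pvPopSpec nums (i : Int) q (pvContrib nums c)
      ((pvStk nums c i).filter (fun j : Nat => q (j : Int)))
      ((pvStk nums c i).filter (fun j : Nat => !(q (j : Int)))) res
      (fun j hj => (List.mem_filter.mp hj).2)
      (fun b w hbw => by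
        have hb : b ∈ (pvStk nums c i).filter (fun j : Nat => !(q (j : Int))) := by
          rw [hbw]; exact List.mem_cons_self
        have := (List.mem_filter.mp hb).2
        simpa using this)
      ?hadj
  · rw [show ((pvStk nums c i).map (fun j : Nat => (j : Int)) ++ [-1])
        = ((((pvStk nums c i).filter (fun j : Nat => q (j : Int)))
            ++ ((pvStk nums c i).filter (fun j : Nat => !(q (j : Int))))).map (fun j : Nat => (j : Int)) ++ [-1])
      from by rw [← hsplit]]
    exact happ
  case hadj =>
    intro r u j rest heq
    have hjP : j ∈ (pvStk nums c i).filter (fun j : Nat => q (j : Int)) := by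
      rw [heq]; exact List.mem_append_right u List.mem_cons_self
    have hjS : j ∈ pvStk nums c i := List.mem_of_mem_filter hjP
    have hqj : q (j : Int) = true := (List.mem_filter.mp hjP).2
    obtain ⟨hji, hsurv⟩ := (pvStk_mem nums c i j).mp hjS
    have hSsplit : pvStk nums c i
        = u ++ j :: (rest ++ (pvStk nums c i).filter (fun j : Nat => !(q (j : Int)))) := by
      conv_lhs => rw [hsplit, heq]
      simp [List.append_assoc]
    set K := (pvStk nums c i).filter (fun j : Nat => !(q (j : Int))) with hK
    have hb0 : -1 ≤ pvBelow (rest ++ K) := by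
      cases rest ++ K with
      | nil => simp only [pvBelow]; omega
      | cons b w => simp only [pvBelow]; omega
    have hbj : pvBelow (rest ++ K) < (j : Int) := by
      cases hrk : rest ++ K with
      | nil => simp only [pvBelow]; omega
      | cons b w =>
        rw [hSsplit, hrk] at hpair
        rw [List.pairwise_append] at hpair
        have := hpair.2.1
        rw [List.pairwise_cons] at this
        have hbj' := this.1 b (by simp)
        simp only [pvBelow]; omega
    have hbs : pvBelow (rest ++ K) = -1 ∨
        (0 ≤ pvBelow (rest ++ K) ∧ pvSurv nums c (pvBelow (rest ++ K)).toNat i = true) := by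
      cases hrk : rest ++ K with
      | nil => left; rfl
      | cons b w =>
        right
        refine ⟨by simp only [pvBelow]; omega, ?_⟩
        have hbmem : b ∈ pvStk nums c i := by
          rw [hSsplit, hrk]
          exact List.mem_append_right u (List.mem_cons_of_mem j (by simp))
        have := ((pvStk_mem nums c i b).mp hbmem).2
        simpa [pvBelow] using this
    have hgap : ∀ m : Nat, pvBelow (rest ++ K) < (m : Int) → m < j → pvSurv nums c m i = false := by
      intro m h1 h2
      rcases Bool.eq_false_or_eq_true (pvSurv nums c m i) with h | h
      · exfalso
        have hm : m ∈ pvStk nums c i := (pvStk_mem nums c i m).mpr ⟨by omega, h⟩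
        exact pv_desc_gap (pvStk nums c i) hpair u j (rest ++ K) hSsplit m hm h1 h2
      · exact h
    have hnxt := pvNxt_eq nums c i j hsurv hji hin ((hq j hjS).mp hqj)
    have hlft := pvLft_eq nums c Htrans Htot i j hsurv hji (pvBelow (rest ++ K)) hb0 hbj hbs hgap
    rw [pvContrib, hnxt, hlft, pvV_natCast]
    have hprod : ((i : Int) - (j : Int)) * ((j : Int) - pvBelow (rest ++ K))
        = ((j : Int) - (pvBelow (rest ++ K) + 1) + 1) * ((i : Int) - (j : Int)) := by ring
    rw [hprod]
    split
    · rfl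
    · rw [PySem.Int.bxor_zero]

-- ---- instantiations of the order hypotheses ----
theorem pvGT_irr : ∀ a : Int, pvGT a a = false := by intro a; simp [pvGT]
theorem pvGT_trans : ∀ a b d : Int, pvGT a b = true → pvGT b d = true → pvGT a d = true := by
  intro a b d h1 h2; simp [pvGT] at *; omega
theorem pvGT_tot : ∀ a b d : Int, pvGT a d = true → pvGT a b = true ∨ pvGT b d = true := by
  intro a b d h; simp [pvGT] at *; omega
theorem pvLT_irr : ∀ a : Int, pvLT a a = false := by intro a; simp [pvLT]
theorem pvLT_trans : ∀ a b d : Int, pvLT a b = true → pvLT b d = true → pvLT a d = true := by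
  intro a b d h1 h2; simp [pvLT] at *; omega
theorem pvLT_tot : ∀ a b d : Int, pvLT a d = true → pvLT a b = true ∨ pvLT b d = true := by
  intro a b d h; simp [pvLT] at *; omega

-- ---- res bookkeeping ----
theorem pv_term_succ (s cc : Bool) (C : Int) :
    (if (s && !cc) then (0 : Int) else C)
      = PySem.Int.bxor (if s then 0 else C) (if s && cc then C else 0) := by
  cases s <;> cases cc <;> simp [PySem.Int.bxor_zero, pv_bxor_zero_left]

theorem pv_bxor_rearrange (a b c d : Int) :
    PySem.Int.bxor (PySem.Int.bxor a b) (PySem.Int.bxor c d)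
      = PySem.Int.bxor (PySem.Int.bxor (PySem.Int.bxor a c) b) d := by
  simp only [pv_bxor_assoc]
  congr 1
  rw [pv_bxor_left_comm]

-- Δ of a stack filter as a range-indexed xor
theorem pv_delta_eq (nums : List Int) (c : Int → Int → Bool) (i : Nat) (p : Nat → Bool) :
    pvXorList ((List.range i).map (fun j => if pvSurv nums c j i && p j then pvContrib nums c j else 0))
      = pvXorList (((pvStk nums c i).filter p).map (pvContrib nums c)) := by
  rw [pvXorList_ite_filter]
  unfold pvStk
  rw [List.filter_reverse, List.map_reverse, pvXorList_reverse, List.filter_filter]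
  congr 2
  apply List.filter_congr
  intro j hj
  rw [Bool.and_comm]

theorem pvRes_succ (nums : List Int) (c₁ c₂ : Int → Int → Bool)
    (Hirr₁ : ∀ a, c₁ a a = false) (Hirr₂ : ∀ a, c₂ a a = false) (i : Nat) :
    pvRes nums c₁ c₂ (i + 1)
      = PySem.Int.bxor
          (PySem.Int.bxor (pvRes nums c₁ c₂ i)
            (pvXorList (((pvStk nums c₁ i).filter (fun j => c₁ (pvV nums j) (pvV nums i))).map (pvContrib nums c₁))))
          (pvXorList (((pvStk nums c₂ i).filter (fun j => c₂ (pvV nums j) (pvV nums i))).map (pvContrib nums c₂))) := by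
  unfold pvRes
  rw [List.range_succ]
  simp only [List.map_append, List.map_cons, List.map_nil]
  rw [pvXorList_snoc]
  have hii₁ : pvSurv nums c₁ i (i + 1) = true := by rw [pvSurv_iff]; intro m hm hjm; omega
  have hii₂ : pvSurv nums c₂ i (i + 1) = true := by rw [pvSurv_iff]; intro m hm hjm; omega
  rw [hii₁, hii₂]
  simp only [if_true]
  rw [show PySem.Int.bxor (0 : Int) 0 = 0 from PySem.Int.bxor_zero 0, PySem.Int.bxor_zero]
  have hmap : (List.range i).map (fun j =>
      PySem.Int.bxor (if pvSurv nums c₁ j (i + 1) then 0 else pvContrib nums c₁ j)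
                     (if pvSurv nums c₂ j (i + 1) then 0 else pvContrib nums c₂ j))
      = (List.range i).map (fun j =>
      PySem.Int.bxor
        (PySem.Int.bxor (if pvSurv nums c₁ j i then 0 else pvContrib nums c₁ j)
          (if pvSurv nums c₁ j i && c₁ (pvV nums j) (pvV nums i) then pvContrib nums c₁ j else 0))
        (PySem.Int.bxor (if pvSurv nums c₂ j i then 0 else pvContrib nums c₂ j)
          (if pvSurv nums c₂ j i && c₂ (pvV nums j) (pvV nums i) then pvContrib nums c₂ j else 0))) := by
    apply List.map_congr_left
    intro j hj
    rw [List.mem_range] at hj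
    rw [pvSurv_succ nums c₁ Hirr₁ j i (by omega), pvSurv_succ nums c₂ Hirr₂ j i (by omega)]
    rw [pv_term_succ, pv_term_succ]
  rw [hmap, pvXorList_map_bxor, pvXorList_map_bxor, pvXorList_map_bxor, pv_bxor_rearrange,
    ← pvXorList_map_bxor, pv_delta_eq, pv_delta_eq]

-- final merge: after the flush every index has contributed exactly once
theorem pv_bxor_regroup (a b c d : Int) :
    PySem.Int.bxor (PySem.Int.bxor (PySem.Int.bxor a b) c) d
      = PySem.Int.bxor (PySem.Int.bxor a c) (PySem.Int.bxor b d) := by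
  simp only [pv_bxor_assoc]
  congr 1
  rw [← pv_bxor_assoc, ← pv_bxor_assoc, PySem.Int.bxor_comm b c]

theorem pvRes_final (nums : List Int) (c₁ c₂ : Int → Int → Bool) (n : Nat) :
    PySem.Int.bxor
        (PySem.Int.bxor (pvRes nums c₁ c₂ n)
          (pvXorList ((pvStk nums c₁ n).map (pvContrib nums c₁))))
        (pvXorList ((pvStk nums c₂ n).map (pvContrib nums c₂)))
      = pvXorList ((List.range n).map (fun j =>
          PySem.Int.bxor (pvContrib nums c₁ j) (pvContrib nums c₂ j))) := by
  have hstk : ∀ (c : Int → Int → Bool),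
      pvXorList ((pvStk nums c n).map (pvContrib nums c))
        = pvXorList ((List.range n).map (fun j => if pvSurv nums c j n then pvContrib nums c j else 0)) := by
    intro c
    rw [pvXorList_ite_filter]
    unfold pvStk
    rw [List.map_reverse, pvXorList_reverse]
  rw [hstk c₁, hstk c₂]
  unfold pvRes
  rw [pvXorList_map_bxor, pv_bxor_regroup, ← pvXorList_map_bxor, ← pvXorList_map_bxor]
  conv_rhs => rw [pvXorList_map_bxor]
  congr 1
  · congr 1
    apply List.map_congr_left
    intro j hj
    rcases Bool.eq_false_or_eq_true (pvSurv nums c₁ j n) with h1 | h1 <;>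
      simp [h1, PySem.Int.bxor_zero, pv_bxor_zero_left]
  · congr 1
    apply List.map_congr_left
    intro j hj
    rcases Bool.eq_false_or_eq_true (pvSurv nums c₂ j n) with h2 | h2 <;>
      simp [h2, PySem.Int.bxor_zero, pv_bxor_zero_left]

-- ---- the A-side loop ----
theorem pvStepA_eq (nums : List Int) (i : Nat) (hin : i < nums.length) :
    pvStepA nums
      ((pvStk nums pvGT i).map (fun j : Nat => (j : Int)) ++ [-1],
       (pvStk nums pvLT i).map (fun j : Nat => (j : Int)) ++ [-1],
       pvRes nums pvGT pvLT i) (i : Int)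
    = ((pvStk nums pvGT (i + 1)).map (fun j : Nat => (j : Int)) ++ [-1],
       (pvStk nums pvLT (i + 1)).map (fun j : Nat => (j : Int)) ++ [-1],
       pvRes nums pvGT pvLT (i + 1)) := by
  have hq1 : ∀ j : Nat, j ∈ pvStk nums pvGT i →
      ((fun t => decide (PySem.List.pyGetD nums t 0 > PySem.List.pyGetD nums (i : Int) 0)) ((j : Nat) : Int) = true
        ↔ (i = nums.length ∨ pvGT (pvV nums j) (pvV nums i) = true)) := by
    intro j hj
    simp only [pvV_natCast, pvGT]
    constructor
    · intro h; exact Or.inr h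
    · intro h
      rcases h with h | h
      · omega
      · exact h
  have hq2 : ∀ j : Nat, j ∈ pvStk nums pvLT i →
      ((fun t => decide (PySem.List.pyGetD nums t 0 < PySem.List.pyGetD nums (i : Int) 0)) ((j : Nat) : Int) = true
        ↔ (i = nums.length ∨ pvLT (pvV nums j) (pvV nums i) = true)) := by
    intro j hj
    simp only [pvV_natCast, pvLT]
    constructor
    · intro h; exact Or.inr h
    · intro h
      rcases h with h | h
      · omega
      · exact h
  simp only [pvStepA]
  rw [pvPopStep nums pvGT pvGT_trans pvGT_tot i (le_of_lt hin) _ hq1]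
  rw [pvPopStep nums pvLT pvLT_trans pvLT_tot i (le_of_lt hin) _ hq2]
  rw [pvStk_succ nums pvGT pvGT_irr i, pvStk_succ nums pvLT pvLT_irr i,
      pvRes_succ nums pvGT pvLT pvGT_irr pvLT_irr i]
  simp only [pvGT, pvLT, pvV_natCast, List.map_cons, List.cons_append]

theorem pvAloop (nums : List Int) (i : Nat) (hin : i ≤ nums.length) :
    (PySem.List.pyRange 0 (i : Int) 1).foldl (pvStepA nums) ([-1], [-1], 0)
    = ((pvStk nums pvGT i).map (fun j : Nat => (j : Int)) ++ [-1],
       (pvStk nums pvLT i).map (fun j : Nat => (j : Int)) ++ [-1],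
       pvRes nums pvGT pvLT i) := by
  induction i with
  | zero =>
    rw [PySem.List.pyRange_one_eq_nil (by omega)]
    simp [pvStk, pvRes, pvXorList]
  | succ k ih =>
    have hcast : ((k + 1 : Nat) : Int) = (k : Int) + 1 := by push_cast; ring
    rw [hcast, PySem.List.pyRange_one_succ_right (by omega), List.foldl_append, List.foldl_cons,
      List.foldl_nil, ih (by omega)]
    exact pvStepA_eq nums k (by omega)

theorem pvAfull (nums : List Int) :
    XorSum nums = pvXorList ((List.range nums.length).map (fun j =>
      PySem.Int.bxor (pvContrib nums pvGT j) (pvContrib nums pvLT j))) := by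
  have hq : ∀ (c : Int → Int → Bool), ∀ j : Nat, j ∈ pvStk nums c nums.length →
      ((fun _ : Int => true) ((j : Nat) : Int) = true
        ↔ (nums.length = nums.length ∨ c (pvV nums j) (pvV nums nums.length) = true)) := by
    intro c j hj
    simp
  simp only [XorSum]
  rw [PySem.List.len_eq, pvAloop nums nums.length le_rfl]
  rw [pvPopStep nums pvGT pvGT_trans pvGT_tot nums.length le_rfl _ (hq pvGT)]
  rw [pvPopStep nums pvLT pvLT_trans pvLT_tot nums.length le_rfl _ (hq pvLT)]
  simp only [Bool.not_true, List.filter_false, List.filter_true]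
  rw [pvRes_final]

theorem pv_if_push (b : Bool) (r x : Int) :
    (if b = true then PySem.Int.bxor r x else r) = PySem.Int.bxor r (if b = true then x else 0) := by
  cases b <;> simp [PySem.Int.bxor_zero]

-- ---- the B-side loop ----
theorem pvStepB_eq (nums : List Int) (res : Int) (i : Nat) :
    pvStepB nums res (i : Int)
      = PySem.Int.bxor (PySem.Int.bxor res (pvContrib nums pvGT i)) (pvContrib nums pvLT i) := by
  have hge : ∀ x : Int, (fun x => decide (x ≥ pvV nums i)) x = (fun x => !(pvGT (pvV nums i) x)) x := by
    intro x
    by_cases h : x ≥ pvV nums i <;> simp [pvGT, h] <;> omega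
  have hle : ∀ x : Int, (fun x => decide (x ≤ pvV nums i)) x = (fun x => !(pvLT (pvV nums i) x)) x := by
    intro x
    by_cases h : x ≤ pvV nums i <;> simp [pvLT, h] <;> omega
  simp only [pvStepB]
  rw [pvV_natCast]
  rw [pvScanR_congr nums _ _ hge ((i : Int) + 1), pvScanR_congr nums _ _ hle ((i : Int) + 1)]
  rw [pv_if_push, pv_if_push]
  simp only [pvContrib, pvLft, pvNxt, pvGT, pvLT]
  rfl

theorem pvBloop (nums : List Int) (i : Nat) :
    (PySem.List.pyRange 0 (i : Int) 1).foldl (pvStepB nums) 0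
      = pvXorList ((List.range i).map (fun j =>
          PySem.Int.bxor (pvContrib nums pvGT j) (pvContrib nums pvLT j))) := by
  induction i with
  | zero =>
    rw [PySem.List.pyRange_one_eq_nil (by omega)]
    simp [pvXorList]
  | succ k ih =>
    have hcast : ((k + 1 : Nat) : Int) = (k : Int) + 1 := by push_cast; ring
    rw [hcast, PySem.List.pyRange_one_succ_right (by omega), List.foldl_append, List.foldl_cons,
      List.foldl_nil, ih, pvStepB_eq, List.range_succ]
    simp only [List.map_append, List.map_cons, List.map_nil]
    rw [pvXorList_snoc, pv_bxor_assoc]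

-- ===== VERDICT (by name: the statement is the Claim_ definition above) =====
theorem XorSum_spec : Claim_equal_XorSum := by
  intro nums _
  unfold Spec_XorSum XorSum_alt
  rw [PySem.List.len_eq, pvBloop nums nums.length, pvAfull]
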